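-- pv_equiv track=rewrite | github.com/PetkoAndreev/Python-Advanced | 11. Exam Preparation/5. Checkmate.py | queen_horizontal_moves
-- ===== SOURCE A (Python) =====
-- def is_valid_coordinates(value, max_value):
--     return 0 <= value < max_value
--
-- def queen_horizontal_moves(size, matrix, queen_row, queen_col):
--     # Left horizontal moves
--     left_queen_col = queen_col - 1
--     while is_valid_coordinates(left_queen_col, size):
--         if matrix[queen_row][left_queen_col] == 'Q':
--             break
--         elif matrix[queen_row][left_queen_col] == 'K':
--             return True
--         left_queen_col -= 1
--
--     # Right horizontal moves
--     right_queen_col = queen_col + 1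
--     while is_valid_coordinates(right_queen_col, size):
--         if matrix[queen_row][right_queen_col] == 'Q':
--             break
--         elif matrix[queen_row][right_queen_col] == 'K':
--             return True
--         right_queen_col += 1
--     # If to the left and to the right of the matrix are only '.'
--     return False
-- ===== SOURCE B (Python) =====
-- def queen_horizontal_moves(size, matrix, queen_row, queen_col):
--     # Collect the board segments the queen can see, nearest cell first,
--     # then decide each by comparing the positions of the nearest 'K' and 'Q'.
--     segs = []
--     if 0 <= queen_col - 1 < size:                     # left scan region exists
--         segs.append(matrix[queen_row][:queen_col][::-1])
--     if 0 <= queen_col + 1 < size:                     # right scan region exists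
--         segs.append(matrix[queen_row][queen_col + 1:size])
--     for seg in segs:
--         k = seg.index('K') if 'K' in seg else -1
--         q = seg.index('Q') if 'Q' in seg else -1
--         if k != -1 and (q == -1 or k < q):
--             return True
--     return False
-- ===== Notes on version B (the rewrite author's own statement) =====
-- stated objective: simpler
-- what changed: Replaces A's two outward cell-by-cell stepping while-loops with slicing out the visible left (reversed) and right row segments and deciding each by comparing the index of the nearest 'K' with the index of the nearest 'Q'.
-- outside the precondition, e.g. on queen_horizontal_moves(5, [['.', 'K']], 0, 0): A returns True, B returns True
import Mathlib
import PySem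

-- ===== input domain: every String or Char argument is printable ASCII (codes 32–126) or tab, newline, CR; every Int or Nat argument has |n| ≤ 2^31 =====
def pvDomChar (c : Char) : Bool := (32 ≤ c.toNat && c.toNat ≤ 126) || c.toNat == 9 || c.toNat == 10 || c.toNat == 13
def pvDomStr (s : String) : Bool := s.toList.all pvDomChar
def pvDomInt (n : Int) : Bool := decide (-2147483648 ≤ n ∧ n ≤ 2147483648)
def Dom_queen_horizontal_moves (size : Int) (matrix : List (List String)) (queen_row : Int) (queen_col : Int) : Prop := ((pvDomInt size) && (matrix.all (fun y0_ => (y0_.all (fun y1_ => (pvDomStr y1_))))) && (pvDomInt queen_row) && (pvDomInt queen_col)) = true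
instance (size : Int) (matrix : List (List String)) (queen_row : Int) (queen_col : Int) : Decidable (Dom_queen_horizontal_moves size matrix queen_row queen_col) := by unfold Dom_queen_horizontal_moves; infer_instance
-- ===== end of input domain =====

-- B replaces A's two cell-by-cell stepping while-loops by slicing out the visible
-- segments and comparing the positions of the nearest 'K' and 'Q' (objective: simpler).

-- ===== PORT A =====
def is_valid_coordinates (value max_value : Int) : Bool := decide (0 ≤ value ∧ value < max_value)

-- left while-loop of A; `true` = `return True`, `false` = fall through (break or loop end).
-- row accesses are in range on every input admitted by Pre_, so `.getD ""` is never the raising case there.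
def pvLeftLoop (size : Int) (row : List String) (i : Int) : Bool :=
  if h : is_valid_coordinates i size = true then
    if (PySem.List.pyGet? row i).getD "" == "Q" then false
    else if (PySem.List.pyGet? row i).getD "" == "K" then true
    else pvLeftLoop size row (i - 1)
  else false
termination_by (i + 1).toNat
decreasing_by simp [is_valid_coordinates] at h; omega

-- right while-loop of A
def pvRightLoop (size : Int) (row : List String) (i : Int) : Bool :=
  if h : is_valid_coordinates i size = true then
    if (PySem.List.pyGet? row i).getD "" == "Q" then false
    else if (PySem.List.pyGet? row i).getD "" == "K" then true
    else pvRightLoop size row (i + 1)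
  else false
termination_by (size - i).toNat
decreasing_by simp [is_valid_coordinates] at h; omega

def queen_horizontal_moves (size : Int) (matrix : List (List String)) (queen_row : Int) (queen_col : Int) : Bool :=
  if pvLeftLoop size ((PySem.List.pyGet? matrix queen_row).getD []) (queen_col - 1) then true
  else pvRightLoop size ((PySem.List.pyGet? matrix queen_row).getD []) (queen_col + 1)

-- ===== PORT B =====
-- seg.index('K') if 'K' in seg else -1  (index? is some iff the membership test holds)
def pvIdxOr (seg : List String) (v : String) : Int :=
  match PySem.List.index? seg v with
  | some n => (n : Int)
  | none => -1

def pvSegHit (seg : List String) : Bool :=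
  let k := pvIdxOr seg "K"
  let q := pvIdxOr seg "Q"
  k != -1 && (q == -1 || k < q)

def queen_horizontal_moves_alt (size : Int) (matrix : List (List String)) (queen_row : Int) (queen_col : Int) : Bool :=
  let segs : List (List String) :=
    (if 0 ≤ queen_col - 1 ∧ queen_col - 1 < size then
       [(PySem.List.slice ((PySem.List.pyGet? matrix queen_row).getD []) none (some queen_col)).reverse]
     else []) ++
    (if 0 ≤ queen_col + 1 ∧ queen_col + 1 < size then
       [PySem.List.slice ((PySem.List.pyGet? matrix queen_row).getD []) (some (queen_col + 1)) (some size)]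
     else [])
  segs.any pvSegHit

-- ===== PRECONDITION & SPEC =====
-- Pre_ excludes inputs on which a scan region exists but the queen's row index is invalid or the
-- row holds fewer than `size` cells: there A usually raises IndexError, and on the few such inputs
-- where a nearby 'K'/'Q' stops A before the short row runs out A's value is reproduced by B anyway,
-- but the out-of-range cells make the claim about a board they do not describe.
def Pre_queen_horizontal_moves (size : Int) (matrix : List (List String)) (queen_row : Int) (queen_col : Int) : Prop :=
  ((0 ≤ queen_col - 1 ∧ queen_col - 1 < size) ∨ (0 ≤ queen_col + 1 ∧ queen_col + 1 < size)) →
    ((PySem.List.pyGet? matrix queen_row).isSome = true ∧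
     size ≤ ((PySem.List.pyGet? matrix queen_row).getD []).length)
instance (size : Int) (matrix : List (List String)) (queen_row : Int) (queen_col : Int) : Decidable (Pre_queen_horizontal_moves size matrix queen_row queen_col) := by unfold Pre_queen_horizontal_moves; infer_instance

def pvWitness_queen_horizontal_moves : Int × List (List String) × Int × Int :=
  (3, [["K", ".", "Q"]], 0, 2)

def Spec_queen_horizontal_moves (size : Int) (matrix : List (List String)) (queen_row : Int) (queen_col : Int) (out : Bool) : Prop := out = queen_horizontal_moves_alt size matrix queen_row queen_col
instance (size : Int) (matrix : List (List String)) (queen_row : Int) (queen_col : Int) (out : Bool) : Decidable (Spec_queen_horizontal_moves size matrix queen_row queen_col out) := by unfold Spec_queen_horizontal_moves; infer_instance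

-- ===== CLAIM (what is proved, stated in full; the proofs are below) =====
def Claim_equal_queen_horizontal_moves : Prop := ∀ (size : Int) (matrix : List (List String)) (queen_row : Int) (queen_col : Int), Dom_queen_horizontal_moves size matrix queen_row queen_col → Pre_queen_horizontal_moves size matrix queen_row queen_col → Spec_queen_horizontal_moves size matrix queen_row queen_col (queen_horizontal_moves size matrix queen_row queen_col)

-- ===== LEMMAS AND PROOFS =====

-- outcome of scanning a list of cells in order: true at the first "K", false at the first "Q" or the end
def pvScan : List String → Bool
  | [] => false
  | c :: rest => if c == "Q" then false else if c == "K" then true else pvScan rest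

theorem pvIdxOr_ge (seg : List String) (v : String) : -1 ≤ pvIdxOr seg v := by
  rw [pvIdxOr]
  cases PySem.List.index? seg v
  · simp
  · simp

theorem pvIdxOr_cons (c : String) (rest : List String) (v : String) :
    pvIdxOr (c :: rest) v
      = if c = v then 0 else if pvIdxOr rest v = -1 then -1 else pvIdxOr rest v + 1 := by
  by_cases h : c = v
  · subst h
    rw [pvIdxOr, PySem.List.index?_cons_self, if_pos rfl]
    rfl
  · rw [if_neg h, pvIdxOr, PySem.List.index?_cons_of_ne rest h]
    cases h2 : PySem.List.index? rest v
    · simp only [pvIdxOr, h2, Option.map_none]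
      simp
    · rename_i n
      simp only [pvIdxOr, h2, Option.map_some]
      rw [if_neg (by omega)]
      push_cast
      ring

theorem pvSegHit_eq_pvScan (seg : List String) : pvSegHit seg = pvScan seg := by
  induction seg with
  | nil => decide
  | cons c rest ih =>
    have hKg := pvIdxOr_ge rest "K"
    have hQg := pvIdxOr_ge rest "Q"
    simp only [pvSegHit, pvScan, pvIdxOr_cons, ← ih]
    set a := pvIdxOr rest "K" with ha'
    set b := pvIdxOr rest "Q" with hb'
    by_cases hq : c = "Q"
    · subst hq
      simp only [if_neg (show ¬ ("Q" : String) = "K" by decide),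
        beq_self_eq_true, if_true]
      by_cases hak : a = -1
      · simp [hak]
      · simp [hak]
        omega
    · by_cases hk : c = "K"
      · subst hk
        simp only [if_neg (show ¬ ("K" : String) = "Q" by decide),
          if_neg (show ¬ (("K" : String) == "Q") = true by decide), beq_self_eq_true, if_true]
        by_cases hbq : b = -1
        · simp [hbq]
        · simp [hbq]
          omega
      · simp only [if_neg hq, if_neg hk, if_neg (show ¬ (c == "Q") = true by simpa using hq),
          if_neg (show ¬ (c == "K") = true by simpa using hk)]
        by_cases hak : a = -1
        · simp [hak]
        · have e1 : (a + 1 != -1) = true := by simp; omega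
          have e2 : (a != -1) = true := by simp [hak]
          by_cases hbq : b = -1
          · simp [hak, hbq]
            rw [e1, e2]
          · have e3 : (b + 1 == -1) = false := by simp; omega
            have e4 : (b == -1) = false := by simp [hbq]
            simp [hak, hbq, e1, e2, e3, e4, show a + 1 < b + 1 ↔ a < b from by omega]

theorem pvLeftLoop_eq_pvScan (size : Int) (row : List String) (i : Int)
    (hs : size ≤ (row.length : Int)) (hi : i < size) :
    pvLeftLoop size row i = pvScan (row.take (i + 1).toNat).reverse := by
  by_cases h0 : 0 ≤ i
  · have hlen : i.toNat < row.length := by omega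
    have htake : (row.take (i + 1).toNat) = row.take i.toNat ++ [row[i.toNat]] := by
      have : (i + 1).toNat = i.toNat + 1 := by omega
      rw [this, List.take_add_one, List.getElem?_eq_getElem hlen]
      simp
    rw [pvLeftLoop, dif_pos (by simp [is_valid_coordinates]; omega), htake]
    rw [PySem.List.pyGet?_of_nonneg row h0, List.getElem?_eq_getElem hlen]
    simp only [Option.getD_some, List.reverse_append, List.reverse_cons, List.reverse_nil,
      List.nil_append, List.cons_append, pvScan]
    by_cases hq : row[i.toNat] = "Q"
    · simp [hq]
    · by_cases hk : row[i.toNat] = "K"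
      · simp [hk]
      · rw [if_neg (by simpa using hq), if_neg (by simpa using hk),
            if_neg (by simpa using hq), if_neg (by simpa using hk)]
        have := pvLeftLoop_eq_pvScan size row (i - 1) hs (by omega)
        rwa [show i - 1 + 1 = i by ring] at this
  · rw [pvLeftLoop, dif_neg (by simp [is_valid_coordinates]; omega)]
    have : (i + 1).toNat = 0 := by omega
    simp [this, pvScan]
termination_by (i + 1).toNat
decreasing_by omega

theorem pvRightLoop_eq_pvScan (size : Int) (row : List String) (i : Int)
    (hs : size ≤ (row.length : Int)) (h0 : 0 ≤ i) :
    pvRightLoop size row i = pvScan ((row.take size.toNat).drop i.toNat) := by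
  by_cases hi : i < size
  · have hlen : i.toNat < row.length := by omega
    have hdrop : (row.take size.toNat).drop i.toNat
        = row[i.toNat] :: ((row.take size.toNat).drop (i.toNat + 1)) := by
      rw [List.drop_eq_getElem_cons (by simp; omega)]
      simp [List.getElem_take]
    rw [pvRightLoop, dif_pos (by simp [is_valid_coordinates]; omega), hdrop]
    rw [PySem.List.pyGet?_of_nonneg row h0, List.getElem?_eq_getElem hlen]
    simp only [Option.getD_some, pvScan]
    by_cases hq : row[i.toNat] = "Q"
    · simp [hq]
    · by_cases hk : row[i.toNat] = "K"
      · simp [hk]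
      · rw [if_neg (by simpa using hq), if_neg (by simpa using hk),
            if_neg (by simpa using hq), if_neg (by simpa using hk)]
        have := pvRightLoop_eq_pvScan size row (i + 1) hs (by omega)
        rwa [show (i + 1).toNat = i.toNat + 1 by omega] at this
  · rw [pvRightLoop, dif_neg (by simp [is_valid_coordinates]; omega)]
    have : (row.take size.toNat).drop i.toNat = [] := by
      apply List.drop_eq_nil_of_le
      simp; omega
    simp [this, pvScan]
termination_by (size - i).toNat
decreasing_by omega

-- ===== VERDICT (by name: the statement is the Claim_ definition above) =====
theorem queen_horizontal_moves_spec : Claim_equal_queen_horizontal_moves := by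
  intro size matrix queen_row queen_col _ hpre
  unfold Spec_queen_horizontal_moves queen_horizontal_moves queen_horizontal_moves_alt
  set row := (PySem.List.pyGet? matrix queen_row).getD [] with hrow
  by_cases hl : 0 ≤ queen_col - 1 ∧ queen_col - 1 < size
  · obtain ⟨-, hs⟩ := hpre (Or.inl hl)
    rw [if_pos hl]
    have hL : pvLeftLoop size row (queen_col - 1)
        = pvSegHit (PySem.List.slice row none (some queen_col)).reverse := by
      rw [pvSegHit_eq_pvScan, pvLeftLoop_eq_pvScan size row _ hs hl.2,
          PySem.List.slice_to row (show (0:Int) ≤ queen_col by omega)]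
      norm_num
    by_cases hr : 0 ≤ queen_col + 1 ∧ queen_col + 1 < size
    · rw [if_pos hr]
      have hR : pvRightLoop size row (queen_col + 1)
          = pvSegHit (PySem.List.slice row (some (queen_col + 1)) (some size)) := by
        rw [pvSegHit_eq_pvScan, pvRightLoop_eq_pvScan size row _ hs hr.1,
            PySem.List.slice_toNat row hr.1 (by omega), List.drop_take]
      simp only [List.cons_append, List.nil_append, List.any_cons, List.any_nil, Bool.or_false]
      rw [← hL, ← hR]
      cases pvLeftLoop size row (queen_col - 1) <;> simp
    · rw [if_neg hr]
      have hR : pvRightLoop size row (queen_col + 1) = false := by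
        rw [pvRightLoop, dif_neg]
        simp [is_valid_coordinates]; omega
      simp only [List.append_nil, List.any_cons, List.any_nil, Bool.or_false]
      rw [← hL, hR]
      cases pvLeftLoop size row (queen_col - 1) <;> simp
  · rw [if_neg hl]
    have hL : pvLeftLoop size row (queen_col - 1) = false := by
      rw [pvLeftLoop, dif_neg]
      simp [is_valid_coordinates]; omega
    rw [hL]
    by_cases hr : 0 ≤ queen_col + 1 ∧ queen_col + 1 < size
    · obtain ⟨-, hs⟩ := hpre (Or.inr hr)
      rw [if_pos hr]
      have hR : pvRightLoop size row (queen_col + 1)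
          = pvSegHit (PySem.List.slice row (some (queen_col + 1)) (some size)) := by
        rw [pvSegHit_eq_pvScan, pvRightLoop_eq_pvScan size row _ hs hr.1,
            PySem.List.slice_toNat row hr.1 (by omega), List.drop_take]
      simp only [List.nil_append, List.any_cons, List.any_nil, Bool.or_false]
      rw [← hR]
      simp
    · rw [if_neg hr]
      have hR : pvRightLoop size row (queen_col + 1) = false := by
        rw [pvRightLoop, dif_neg]
        simp [is_valid_coordinates]; omega
      simp [hR]
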